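-- pv_equiv track=rewrite | github.com/Adamssss/projectEuler | Problem 001-150 Python/pb106.py | exactsub
-- ===== SOURCE A (Python) =====
-- def exactsub(oset):
--     l = len(oset)
--     if l == 2:
--         return [[[oset[0]],[oset[1]]]]
--     result = []
--     f = oset[0]
--     rest = oset[1:]
--     result.append([[f],rest])
--     for i in exactsub(rest):
--         a = i[0]
--         b = i[1]
--         result.append([a+[f],b])
--         result.append([a,b+[f]])
--     return result
-- ===== SOURCE B (Python) =====
-- def exactsub(oset):
--     if len(oset) == 2:
--         return [[[oset[0]], [oset[1]]]]
--     result = [[[oset[-2]], [oset[-1]]]]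
--     for idx in reversed(range(len(oset) - 2)):
--         f = oset[idx]
--         rest = oset[idx + 1:]
--         new = [[[f], rest]]
--         for i in result:
--             new.append([i[0] + [f], i[1]])
--             new.append([i[0], i[1] + [f]])
--         result = new
--     return result
-- ===== Notes on version B (the rewrite author's own statement) =====
-- stated objective: alternative
-- what changed: Replaced A's top-down recursion (recurse on oset[1:], then interleave) by an explicit bottom-up loop that starts from the two-element suffix and sweeps indices len-3..0, rebuilding the same list in the same order.
import Mathlib
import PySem

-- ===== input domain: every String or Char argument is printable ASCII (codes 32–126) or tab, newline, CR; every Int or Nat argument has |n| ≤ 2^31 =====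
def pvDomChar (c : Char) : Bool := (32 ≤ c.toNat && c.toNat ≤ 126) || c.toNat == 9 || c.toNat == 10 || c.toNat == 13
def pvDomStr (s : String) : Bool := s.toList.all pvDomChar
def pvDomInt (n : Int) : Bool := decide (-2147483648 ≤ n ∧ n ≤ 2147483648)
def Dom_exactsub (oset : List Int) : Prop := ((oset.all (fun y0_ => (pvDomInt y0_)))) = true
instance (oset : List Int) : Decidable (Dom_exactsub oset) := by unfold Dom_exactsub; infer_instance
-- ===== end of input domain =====

-- B replaces A's top-down recursion by a bottom-up loop over suffixes (same output, same order);
-- objective: alternative decomposition, similar cost.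

-- ===== PORT A =====
-- literal port of A: the l == 2 base case, then f = oset[0], rest = oset[1:] (the cons pattern),
-- and the for-loop over the recursive call as a foldl appending two entries per element.
-- i[0]/i[1] are pyGet? with a default that is never reached on Pre_ (elements always have 2 parts).
-- The [] arm is where Python raises IndexError ([x] recurses into []); excluded by Pre_.
def exactsub (oset : List Int) : List (List (List Int)) :=
  match oset with
  | [a, b] => [[[a], [b]]]
  | f :: rest =>
      (exactsub rest).foldl
        (fun result i =>
          let a := (PySem.List.pyGet? i 0).getD []
          let b := (PySem.List.pyGet? i 1).getD []
          result ++ [[a ++ [f], b], [a, b ++ [f]]])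
        [[[f], rest]]
  | [] => []

-- ===== PORT B =====
-- literal port of Source B: the l == 2 base case, then a loop for idx in reversed(range(len(oset)-2))
-- rebuilding result from the two-element suffix towards the full list.
def exactsub_alt (oset : List Int) : List (List (List Int)) :=
  if oset.length == 2 then
    [[[(PySem.List.pyGet? oset 0).getD 0], [(PySem.List.pyGet? oset 1).getD 0]]]
  else
    ((List.range (oset.length - 2)).reverse).foldl
      (fun result (idx : Nat) =>
        let f := (PySem.List.pyGet? oset (idx : Int)).getD 0
        let rest := PySem.List.slice oset (some ((idx : Int) + 1)) none
        result.foldl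
          (fun new i =>
            let a := (PySem.List.pyGet? i 0).getD []
            let b := (PySem.List.pyGet? i 1).getD []
            new ++ [[a ++ [f], b], [a, b ++ [f]]])
          [[[f], rest]])
      [[[(PySem.List.pyGet? oset (-2)).getD 0], [(PySem.List.pyGet? oset (-1)).getD 0]]]

-- ===== PRECONDITION & SPEC =====
-- Python A raises IndexError on lists of length 0 or 1 (oset[0] on []); excluded here, nothing else is.
def Pre_exactsub (oset : List Int) : Prop := 2 ≤ oset.length
instance (oset : List Int) : Decidable (Pre_exactsub oset) := by unfold Pre_exactsub; infer_instance
def pvWitness_exactsub : List Int := ([1, 2, 3] : List Int)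

def Spec_exactsub (oset : List Int) (out : List (List (List Int))) : Prop := out = exactsub_alt oset
instance (oset : List Int) (out : List (List (List Int))) : Decidable (Spec_exactsub oset out) := by unfold Spec_exactsub; infer_instance

-- ===== CLAIM (what is proved, stated in full; the proofs are below) =====
def Claim_equal_exactsub : Prop := ∀ (oset : List Int), Dom_exactsub oset → Pre_exactsub oset → Spec_exactsub oset (exactsub oset)

-- ===== LEMMAS AND PROOFS =====

-- the body of B's outer loop, named for the proofs
def pvStepB (oset : List Int) (result : List (List (List Int))) (idx : Nat) : List (List (List Int)) :=
  let f := (PySem.List.pyGet? oset (idx : Int)).getD 0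
  let rest := PySem.List.slice oset (some ((idx : Int) + 1)) none
  result.foldl
    (fun new i =>
      let a := (PySem.List.pyGet? i 0).getD []
      let b := (PySem.List.pyGet? i 1).getD []
      new ++ [[a ++ [f], b], [a, b ++ [f]]])
    [[[f], rest]]

theorem exactsub_general (f r1 r2 : Int) (rs : List Int) :
    exactsub (f :: r1 :: r2 :: rs) =
      (exactsub (r1 :: r2 :: rs)).foldl
        (fun result i =>
          let a := (PySem.List.pyGet? i 0).getD []
          let b := (PySem.List.pyGet? i 1).getD []
          result ++ [[a ++ [f], b], [a, b ++ [f]]])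
        [[[f], r1 :: r2 :: rs]] := rfl

-- one outer-loop step rebuilds exactsub of the next longer suffix
theorem pvStepB_drop (oset : List Int) (n : Nat) (h : n + 3 ≤ oset.length) :
    pvStepB oset (exactsub (oset.drop (n + 1))) n = exactsub (oset.drop n) := by
  have hn : n < oset.length := by omega
  have hdrop : oset.drop n = oset[n] :: oset.drop (n + 1) := List.drop_eq_getElem_cons hn
  have hlen : 2 ≤ (oset.drop (n + 1)).length := by
    simp [List.length_drop]; omega
  obtain ⟨r1, t, ht⟩ : ∃ r1 t, oset.drop (n + 1) = r1 :: t := by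
    cases hd : oset.drop (n + 1) with
    | nil => rw [hd] at hlen; simp at hlen
    | cons r1 t => exact ⟨r1, t, rfl⟩
  obtain ⟨r2, rs, hrs⟩ : ∃ r2 rs, t = r2 :: rs := by
    cases hd : t with
    | nil => rw [ht, hd] at hlen; simp at hlen
    | cons r2 rs => exact ⟨r2, rs, rfl⟩
  have hf : (PySem.List.pyGet? oset (n : Int)).getD 0 = oset[n] := by
    rw [PySem.List.pyGet?_natCast]
    simp [List.getElem?_eq_getElem hn]
  have hrest : PySem.List.slice oset (some ((n : Int) + 1)) none = oset.drop (n + 1) := by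
    have : ((n : Int) + 1) = ((n + 1 : Nat) : Int) := by push_cast; ring
    rw [this, PySem.List.slice_from_natCast]
  rw [hdrop, ht, hrs, exactsub_general]
  simp only [pvStepB, hf, hrest, ht, hrs]

-- loop invariant: processing indices n-1 … 0 starting from exactsub of the suffix at n yields exactsub of the whole list
theorem pvLoop_inv (oset : List Int) (n : Nat) (h : n + 2 ≤ oset.length) :
    ((List.range n).reverse).foldl (pvStepB oset) (exactsub (oset.drop n)) = exactsub oset := by
  induction n with
  | zero => simp
  | succ m ih =>
      rw [List.range_succ, List.reverse_append]
      simp only [List.reverse_singleton, List.singleton_append, List.foldl_cons]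
      rw [pvStepB_drop oset m (by omega)]
      exact ih (by omega)

-- ===== VERDICT (by name: the statement is the Claim_ definition above) =====
theorem exactsub_spec : Claim_equal_exactsub := by
  intro oset _ hpre
  unfold Spec_exactsub
  unfold Pre_exactsub at hpre
  by_cases h2 : oset.length = 2
  · obtain ⟨a, t, ht⟩ : ∃ a t, oset = a :: t := by
      cases oset with
      | nil => simp at h2
      | cons a t => exact ⟨a, t, rfl⟩
    obtain ⟨b, hb⟩ : ∃ b, t = [b] := by
      cases t with
      | nil => rw [ht] at h2; simp at h2
      | cons b u =>
          cases u with
          | nil => exact ⟨b, rfl⟩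
          | cons c v => rw [ht] at h2; simp at h2
    subst ht; subst hb
    simp [exactsub, exactsub_alt, PySem.List.pyGet?, PySem.List.pyIdx?]
  · have h3 : 3 ≤ oset.length := by omega
    have hbase :
        [[[(PySem.List.pyGet? oset (-2)).getD 0], [(PySem.List.pyGet? oset (-1)).getD 0]]] =
          exactsub (oset.drop (oset.length - 2)) := by
      have hm2 : oset.length - 2 < oset.length := by omega
      have hm1 : oset.length - 1 < oset.length := by omega
      have hd2 : oset.drop (oset.length - 2) = oset[oset.length - 2] :: oset.drop (oset.length - 1) := by
        have := List.drop_eq_getElem_cons hm2 (l := oset)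
        rwa [show oset.length - 2 + 1 = oset.length - 1 by omega] at this
      have hd1 : oset.drop (oset.length - 1) = [oset[oset.length - 1]] := by
        have := List.drop_eq_getElem_cons hm1 (l := oset)
        rwa [show oset.length - 1 + 1 = oset.length by omega, List.drop_length] at this
      have hg2 : PySem.List.pyGet? oset (-2) = some oset[oset.length - 2] := by
        rw [PySem.List.pyGet?_neg_ofNat oset 2 (by omega) (by omega)]
        simp [List.getElem?_eq_getElem hm2]
      have hg1 : PySem.List.pyGet? oset (-1) = some oset[oset.length - 1] := by
        rw [PySem.List.pyGet?_neg_one, List.getLast?_eq_getElem?]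
        simp [List.getElem?_eq_getElem hm1]
      rw [hd2, hd1, hg2, hg1]
      rfl
    have halt : exactsub_alt oset =
        ((List.range (oset.length - 2)).reverse).foldl (pvStepB oset)
          (exactsub (oset.drop (oset.length - 2))) := by
      rw [exactsub_alt, if_neg (by simpa using h2), hbase]
      rfl
    rw [halt, pvLoop_inv oset (oset.length - 2) (by omega)]
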